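-- pv_equiv track=rewrite | github.com/kaelthasmanu/SquidStats | services/squid/user_restrictions_service.py | _find_delay_insert_index
-- ===== SOURCE A (Python) =====
-- def _find_delay_insert_index(lines: list[str], pool_number: int, deny_all: str) -> int:
--     """Find the index to insert the new delay_access rule.
--
--     Prefers inserting before the pool's existing `deny all`.
--     Falls back to inserting after the pool's `delay_parameters` line.
--     Falls back to end of file.
--     """
--     after_params = len(lines)
--     for i, line in enumerate(lines):
--         stripped = line.strip()
--         if stripped == deny_all:
--             return i
--         if (
--             stripped.startswith(f"delay_parameters {pool_number} ")
--             and after_params == len(lines)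
--         ):
--             after_params = i + 1
--     return after_params
-- ===== SOURCE B (Python) =====
-- def _find_delay_insert_index(lines: list[str], pool_number: int, deny_all: str) -> int:
--     """Two-pass version: deny_all position first, then first delay_parameters line."""
--     deny_idx = next((i for i, line in enumerate(lines) if line.strip() == deny_all), None)
--     if deny_idx is not None:
--         return deny_idx
--     prefix = f"delay_parameters {pool_number} "
--     params_idx = next((i for i, line in enumerate(lines) if line.strip().startswith(prefix)), None)
--     return params_idx + 1 if params_idx is not None else len(lines)
-- ===== Notes on version B (the rewrite author's own statement) =====
-- stated objective: simpler
-- what changed: Replaces the single interleaved early-return loop with accumulator by two independent first-match searches: first for the deny_all line, then for the delay_parameters line.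
import Mathlib
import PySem

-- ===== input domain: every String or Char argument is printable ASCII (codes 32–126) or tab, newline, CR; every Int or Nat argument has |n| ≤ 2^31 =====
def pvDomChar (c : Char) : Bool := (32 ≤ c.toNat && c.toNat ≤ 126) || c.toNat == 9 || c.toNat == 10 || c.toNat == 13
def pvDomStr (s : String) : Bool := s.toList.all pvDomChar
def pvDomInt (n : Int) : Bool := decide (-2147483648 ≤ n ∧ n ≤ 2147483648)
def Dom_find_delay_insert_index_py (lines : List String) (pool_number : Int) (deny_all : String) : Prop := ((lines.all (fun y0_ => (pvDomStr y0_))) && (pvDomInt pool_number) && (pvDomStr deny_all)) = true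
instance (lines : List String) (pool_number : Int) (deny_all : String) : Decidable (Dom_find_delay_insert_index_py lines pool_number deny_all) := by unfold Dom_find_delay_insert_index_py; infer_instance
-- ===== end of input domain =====

-- B replaces A's single interleaved early-return loop (with an after_params accumulator) by two independent first-match searches; same O(n) cost, simpler decomposition.


-- ===== PORT A =====
-- Port of A: the interleaved loop, carrying the index and the after_params accumulator.
def find_delay_insert_index_py_loop (total : Int) (pref : String) (deny_all : String) :
    List String → Int → Int → Int
  | [], _, after_params => after_params
  | line :: rest, i, after_params =>
    let stripped := PySem.Str.strip line
    if stripped == deny_all then i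
    else if PySem.Str.startswith stripped pref && after_params == total then
      find_delay_insert_index_py_loop total pref deny_all rest (i + 1) (i + 1)
    else
      find_delay_insert_index_py_loop total pref deny_all rest (i + 1) after_params

def find_delay_insert_index_py (lines : List String) (pool_number : Int) (deny_all : String) : Int :=
  find_delay_insert_index_py_loop (lines.length : Int)
    ("delay_parameters " ++ PySem.Int.toStr pool_number ++ " ") deny_all lines 0 (lines.length : Int)

-- ===== PORT B =====
-- Port of B: two independent first-match searches.
def find_delay_insert_index_py_alt (lines : List String) (pool_number : Int) (deny_all : String) : Int :=
  match lines.findIdx? (fun line => PySem.Str.strip line == deny_all) with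
  | some i => (i : Int)
  | none =>
    match lines.findIdx? (fun line =>
        PySem.Str.startswith (PySem.Str.strip line)
          ("delay_parameters " ++ PySem.Int.toStr pool_number ++ " ")) with
    | some i => (i : Int) + 1
    | none => (lines.length : Int)

-- ===== PRECONDITION & SPEC =====
def Spec_find_delay_insert_index_py (lines : List String) (pool_number : Int) (deny_all : String) (out : Int) : Prop := out = find_delay_insert_index_py_alt lines pool_number deny_all
instance (lines : List String) (pool_number : Int) (deny_all : String) (out : Int) : Decidable (Spec_find_delay_insert_index_py lines pool_number deny_all out) := by unfold Spec_find_delay_insert_index_py; infer_instance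

-- ===== CLAIM (what is proved, stated in full; the proofs are below) =====
def Claim_equal_find_delay_insert_index_py : Prop := ∀ (lines : List String) (pool_number : Int) (deny_all : String), Dom_find_delay_insert_index_py lines pool_number deny_all → Spec_find_delay_insert_index_py lines pool_number deny_all (find_delay_insert_index_py lines pool_number deny_all)

-- ===== LEMMAS AND PROOFS =====

lemma fdii_loop_eq (pref deny : String) (total : Int) :
    ∀ (rest : List String) (i ap : Int), i + (rest.length : Int) = total →
    find_delay_insert_index_py_loop total pref deny rest i ap =
      (match rest.findIdx? (fun line => PySem.Str.strip line == deny) with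
      | some j => i + (j : Int)
      | none =>
        if ap = total then
          match rest.findIdx? (fun line => PySem.Str.startswith (PySem.Str.strip line) pref) with
          | some j => i + (j : Int) + 1
          | none => ap
        else ap) := by
  intro rest
  induction rest with
  | nil =>
    intro i ap _
    simp only [find_delay_insert_index_py_loop, List.findIdx?_nil]
    split <;> rfl
  | cons hd tl ih =>
    intro i ap h
    have hlen : i + 1 + (tl.length : Int) = total := by
      simp only [List.length_cons] at h; push_cast at h ⊢; omega
    simp only [find_delay_insert_index_py_loop, List.findIdx?_cons]
    cases hd1 : (PySem.Str.strip hd == deny) with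
    | true => simp [hd1]
    | false =>
      cases hd2 : PySem.Str.startswith (PySem.Str.strip hd) pref with
      | false =>
        simp only [hd1, hd2, Bool.false_and, if_false, Bool.false_eq_true]
        rw [ih (i + 1) ap hlen]
        rcases hfd : tl.findIdx? (fun line => PySem.Str.strip line == deny) with _ | j
        · rcases hfp : tl.findIdx? (fun line => PySem.Str.startswith (PySem.Str.strip line) pref) with _ | j
          · simp
          · simp only [Option.map_some, Option.map_none]
            by_cases hap2 : ap = total
            · simp only [hap2, if_true]; push_cast; ring
            · simp [hap2]
        · simp only [Option.map_some]; push_cast; ring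
      | true =>
        by_cases hap : ap = total
        · have hbeq : (ap == total) = true := by simp [hap]
          simp only [hd1, hd2, hbeq, Bool.true_and, if_true, if_false, Bool.false_eq_true]
          rw [ih (i + 1) (i + 1) hlen]
          rcases hfd : tl.findIdx? (fun line => PySem.Str.strip line == deny) with _ | j
          · rcases hfp : tl.findIdx? (fun line => PySem.Str.startswith (PySem.Str.strip line) pref) with _ | j
            · simp only [Option.map_none, hap]
              by_cases hit : i + 1 = total <;> simp [hit]
            · -- tl has a later prefix match, so tl ≠ [] and i+1 < total
              have hpos : 0 < (tl.length : Int) := by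
                cases tl with
                | nil => rw [List.findIdx?_nil] at hfp; simp at hfp
                | cons a b => simp
              have hit : ¬ (i + 1 = total) := by omega
              simp only [Option.map_some, Option.map_none, hit, if_false, hap, if_true]
              push_cast
              ring
          · simp only [Option.map_some]
            push_cast
            ring
        · have hbeq : (ap == total) = false := by simp [hap]
          simp only [hd1, hd2, hbeq, Bool.and_false, if_false, Bool.false_eq_true]
          rw [ih (i + 1) ap hlen]
          rcases hfd : tl.findIdx? (fun line => PySem.Str.strip line == deny) with _ | j
          · simp [hap]
          · simp only [Option.map_some]; push_cast; ring

-- ===== VERDICT (by name: the statement is the Claim_ definition above) =====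
theorem find_delay_insert_index_py_spec : Claim_equal_find_delay_insert_index_py := by
  intro lines pool_number deny_all _
  unfold Spec_find_delay_insert_index_py find_delay_insert_index_py find_delay_insert_index_py_alt
  rw [fdii_loop_eq _ _ _ lines 0 (lines.length : Int) (by simp)]
  rcases hfd : lines.findIdx? (fun line => PySem.Str.strip line == deny_all) with _ | j
  · rcases hfp : lines.findIdx? (fun line =>
        PySem.Str.startswith (PySem.Str.strip line)
          ("delay_parameters " ++ PySem.Int.toStr pool_number ++ " ")) with _ | j
    · simp
    · simp
  · simp
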